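-- pv_equiv track=rewrite | github.com/Musoillll/smartrun | feature_calculator.py | _count_peaks
-- ===== SOURCE A (Python) =====
-- def _count_peaks(y_series: list, min_prominence: int = 5) -> int:
--     """
--     计算序列中的波峰数量
--     min_prominence: 最小波峰显著度（像素），过滤噪声
--     """
--     peaks = 0
--     n = len(y_series)
--
--     for i in range(1, n - 1):
--         # 局部最小值（Y减小 = 抬腿）
--         if y_series[i] < y_series[i - 1] and y_series[i] < y_series[i + 1]:
--             # 检查显著度
--             left_max = max(y_series[max(0, i - 5):i])
--             right_max = max(y_series[i + 1:min(n, i + 6)])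
--             prominence = min(left_max, right_max) - y_series[i]
--             if prominence >= min_prominence:
--                 peaks += 1
--
--     return peaks
-- ===== SOURCE B (Python) =====
-- def _count_peaks(y_series: list, min_prominence: int = 5) -> int:
--     # Streaming single pass: no indexing/slicing of the input; constant-size
--     # buffers (up to 5 previous values, most recent first, and a lookahead of
--     # up to 6 upcoming values) are maintained while pulling from an iterator.
--     it = iter(y_series)
--     ahead = []
--     for _ in range(6):
--         for v in it:
--             ahead.append(v)
--             break
--     left5 = []
--     peaks = 0
--     while len(ahead) >= 2:
--         cur = ahead[0]
--         if left5 and cur < left5[0] and cur < ahead[1]: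
--             if min(max(left5), max(ahead[1:6])) - cur >= min_prominence:
--                 peaks += 1
--         left5 = [cur] + left5[:4]
--         ahead.pop(0)
--         for v in it:
--             ahead.append(v)
--             break
--     return peaks
-- ===== Notes on version B (the rewrite author's own statement) =====
-- stated objective: alternative
-- what changed: B replaces A's random-access index loop (range(1,n-1) with slicing y[i-5:i], y[i+1:i+6]) by a streaming single pass that pulls values one at a time from an iterator, maintaining only two constant-size buffers: the last 5 seen values and a 6-value lookahead; the input is never indexed or sliced.
import Mathlib
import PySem

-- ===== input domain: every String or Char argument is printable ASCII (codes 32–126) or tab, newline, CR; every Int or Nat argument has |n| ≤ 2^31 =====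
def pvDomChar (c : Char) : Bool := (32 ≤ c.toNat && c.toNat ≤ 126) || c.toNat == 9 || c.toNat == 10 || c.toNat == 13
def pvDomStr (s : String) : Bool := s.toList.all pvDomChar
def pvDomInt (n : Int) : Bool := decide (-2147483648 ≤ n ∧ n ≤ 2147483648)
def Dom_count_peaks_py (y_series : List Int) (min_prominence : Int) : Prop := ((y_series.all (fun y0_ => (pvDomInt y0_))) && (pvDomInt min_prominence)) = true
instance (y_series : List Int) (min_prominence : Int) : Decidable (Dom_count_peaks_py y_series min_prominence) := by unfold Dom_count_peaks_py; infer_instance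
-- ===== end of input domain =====

-- B replaces A's index-driven loop with a streaming single pass over the list using
-- constant-size buffers (5 previous values, 6-value lookahead); alternative decomposition, same cost.

-- max(xs) for a nonempty list of ints (both programs only take max of nonempty windows)
def pvMax (xs : List Int) : Int := (PySem.List.max? xs (fun x => x)).getD 0

-- ===== PORT A =====
def count_peaks_py (y_series : List Int) (min_prominence : Int) : Int :=
  let n : Int := y_series.length
  (PySem.List.pyRange 1 (n - 1) 1).foldl
    (fun peaks i =>
      if PySem.List.pyGetD y_series i 0 < PySem.List.pyGetD y_series (i - 1) 0 ∧
         PySem.List.pyGetD y_series i 0 < PySem.List.pyGetD y_series (i + 1) 0 then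
        let left_max := pvMax (PySem.List.slice y_series (some (max 0 (i - 5))) (some i))
        let right_max := pvMax (PySem.List.slice y_series (some (i + 1)) (some (min n (i + 6))))
        let prominence := min left_max right_max - PySem.List.pyGetD y_series i 0
        if prominence ≥ min_prominence then peaks + 1 else peaks
      else peaks)
    0

-- ===== PORT B =====
-- the while-loop of Source B: state = (left5  : up to 5 previous values, most recent first,
--                                  ahead  : lookahead buffer, cur = ahead[0],
--                                  rest   : values not yet pulled from the iterator,
--                                  peaks)
def pvGo (mp : Int) : List Int → List Int → List Int → Int → Int
  | left5, cur :: a1 :: atl, rest, peaks =>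
    let peaks' :=
      match left5 with
      | [] => peaks
      | l0 :: _ =>
        if cur < l0 ∧ cur < a1 then
          if min (pvMax left5) (pvMax ((a1 :: atl).take 5)) - cur ≥ mp then peaks + 1 else peaks
        else peaks
    match rest with
    | [] => pvGo mp (cur :: left5.take 4) (a1 :: atl) [] peaks'
    | r :: rs => pvGo mp (cur :: left5.take 4) (a1 :: atl ++ [r]) rs peaks'
  | _, _, _, peaks => peaks
  termination_by _ ahead rest _ => ahead.length + rest.length
  decreasing_by all_goals simp

def count_peaks_py_alt (y_series : List Int) (min_prominence : Int) : Int :=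
  pvGo min_prominence [] (y_series.take 6) (y_series.drop 6) 0

-- ===== PRECONDITION & SPEC =====
def Spec_count_peaks_py (y_series : List Int) (min_prominence : Int) (out : Int) : Prop := out = count_peaks_py_alt y_series min_prominence
instance (y_series : List Int) (min_prominence : Int) (out : Int) : Decidable (Spec_count_peaks_py y_series min_prominence out) := by unfold Spec_count_peaks_py; infer_instance

-- ===== CLAIM (what is proved, stated in full; the proofs are below) =====
def Claim_equal_count_peaks_py : Prop := ∀ (y_series : List Int) (min_prominence : Int), Dom_count_peaks_py y_series min_prominence → Spec_count_peaks_py y_series min_prominence (count_peaks_py y_series min_prominence)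

-- ===== LEMMAS AND PROOFS =====

-- A's loop body, named for the proofs
def pvBody (y : List Int) (n mp : Int) (peaks i : Int) : Int :=
  if PySem.List.pyGetD y i 0 < PySem.List.pyGetD y (i - 1) 0 ∧
     PySem.List.pyGetD y i 0 < PySem.List.pyGetD y (i + 1) 0 then
    let left_max := pvMax (PySem.List.slice y (some (max 0 (i - 5))) (some i))
    let right_max := pvMax (PySem.List.slice y (some (i + 1)) (some (min n (i + 6))))
    let prominence := min left_max right_max - PySem.List.pyGetD y i 0
    if prominence ≥ mp then peaks + 1 else peaks
  else peaks

lemma count_peaks_py_eq_fold (y : List Int) (mp : Int) :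
    count_peaks_py y mp
      = (PySem.List.pyRange 1 ((y.length : Int) - 1) 1).foldl (pvBody y (y.length : Int) mp) 0 := rfl

lemma pvMax_perm (l1 l2 : List Int) (h : l1.Perm l2) : pvMax l1 = pvMax l2 := by
  unfold pvMax
  cases e1 : PySem.List.max? l1 (fun x => x) with
  | none =>
    have h1 : l1 = [] := (PySem.List.max?_eq_none_iff _ _).mp e1
    have h2 : l2 = [] := by simpa [h1] using h.symm
    simp [h2, PySem.List.max?]
  | some m1 =>
    have hne2 : l2 ≠ [] := by
      intro h2
      have h1 : l1 = [] := by simpa [h2] using h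
      rw [h1] at e1
      simp [PySem.List.max?] at e1
    cases e2 : PySem.List.max? l2 (fun x => x) with
    | none => exact absurd ((PySem.List.max?_eq_none_iff _ _).mp e2) hne2
    | some m2 =>
      have hm1 : m1 ∈ l2 := h.mem_iff.mp (PySem.List.max?_mem e1)
      have hm2 : m2 ∈ l1 := h.mem_iff.mpr (PySem.List.max?_mem e2)
      have h12 : m1 ≤ m2 := PySem.List.max?_isMax e2 m1 hm1
      have h21 : m2 ≤ m1 := PySem.List.max?_isMax e1 m2 hm2
      simp [le_antisymm h12 h21]

lemma pvMax_reverse (l : List Int) : pvMax l.reverse = pvMax l :=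
  pvMax_perm _ _ (List.reverse_perm l)

lemma take_reverse_cons (y : List Int) (j : Nat) (hj : j < y.length) :
    (y.take (j+1)).reverse = y[j] :: (y.take j).reverse := by
  rw [List.take_add_one, List.getElem?_eq_getElem hj]
  simp

-- one iteration of the streaming loop performs A's body at index j+1 and shifts the buffers
lemma pvGo_step (y : List Int) (mp : Int) (j : Nat) (peaks : Int)
    (h2 : j + 2 < y.length) :
    pvGo mp ((y.take (j+1)).reverse.take 5) ((y.drop (j+1)).take 6) (y.drop (j + 7)) peaks
      = pvGo mp ((y.take (j+2)).reverse.take 5) ((y.drop (j+2)).take 6) (y.drop (j + 8))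
          (pvBody y (y.length : Int) mp peaks ((j : Int) + 1)) := by
  have hj : j < y.length := by omega
  have hj1 : j + 1 < y.length := by omega
  -- buffers in cons form
  have hA : (y.drop (j+1)).take 6 = y[j+1] :: y[j+2] :: ((y.drop (j+3)).take 4) := by
    rw [List.drop_eq_getElem_cons hj1, List.drop_eq_getElem_cons h2]
    rfl
  have hL : (y.take (j+1)).reverse = y[j] :: (y.take j).reverse := take_reverse_cons y j hj
  -- the body value matches
  have htail5 : y[j+2] :: ((y.drop (j+3)).take 4) = (y.drop (j+2)).take 5 := by
    rw [List.drop_eq_getElem_cons h2]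
    rfl
  have hbody :
      (if y[j+1] < y[j] ∧ y[j+1] < y[j+2] then
        if min (pvMax (y[j] :: (y.take j).reverse.take 4))
               (pvMax ((y[j+2] :: ((y.drop (j+3)).take 4)).take 5)) - y[j+1] ≥ mp
        then peaks + 1 else peaks
       else peaks) = pvBody y (y.length : Int) mp peaks ((j : Int) + 1) := by
    unfold pvBody
    have e1 : ((j : Int) + 1) = ((j + 1 : Nat) : Int) := by push_cast; ring
    have e2 : ((j : Int) + 1 - 1) = ((j : Nat) : Int) := by ring
    have e3 : ((j : Int) + 1 + 1) = ((j + 2 : Nat) : Int) := by push_cast; ring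
    have e4 : max 0 ((j : Int) + 1 - 5) = ((j - 4 : Nat) : Int) := by omega
    have e5 : min ((y.length : Nat) : Int) ((j : Int) + 7) = ((min y.length (j + 7) : Nat) : Int) := by omega
    have hleft : (y[j] :: (y.take j).reverse).take 5
        = ((y.drop (j-4)).take ((j+1)-(j-4))).reverse := by
      rw [← hL, List.take_reverse]
      have hlen : (y.take (j+1)).length - 5 = j - 4 := by
        rw [List.length_take]; omega
      rw [hlen, List.drop_take]
    have hml : pvMax (y[j] :: (y.take j).reverse.take 4)
        = pvMax ((y.drop (j-4)).take ((j+1)-(j-4))) := by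
      rw [show pvMax (y[j] :: (y.take j).reverse.take 4)
            = pvMax ((y[j] :: (y.take j).reverse).take 5) from rfl,
          hleft, pvMax_reverse]
    have hmr : pvMax ((y[j+2] :: ((y.drop (j+3)).take 4)).take 5)
        = pvMax ((y.drop (j+2)).take (min y.length (j+7) - (j+2))) := by
      rw [show (y[j+2] :: ((y.drop (j+3)).take 4)).take 5
            = ((y.drop (j+2)).take 5).take 5 by rw [htail5]]
      rw [List.take_take]
      congr 1
      rw [List.take_eq_take_iff]
      simp only [List.length_drop]
      omega
    rw [e2, e3, e4, show ((j:Int)+1+6) = ((j:Int)+7) by ring, e5, e1]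
    rw [PySem.List.slice_natCast, PySem.List.slice_natCast]
    simp only [PySem.List.pyGetD_natCast]
    rw [List.getD_eq_getElem y 0 hj1, List.getD_eq_getElem y 0 hj, List.getD_eq_getElem y 0 h2]
    rw [← hml, ← hmr]
  -- unfold one loop step
  rw [hA, hL, show (y[j] :: (y.take j).reverse).take 5
        = y[j] :: (y.take j).reverse.take 4 from rfl]
  have hL2 : (y.take (j+2)).reverse = y[j+1] :: (y.take (j+1)).reverse :=
    take_reverse_cons y (j+1) hj1
  have hL' : y[j+1] :: ((y[j] :: (y.take j).reverse.take 4).take 4)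
      = (y.take (j+2)).reverse.take 5 := by
    rw [hL2, hL]
    rw [show (y[j+1] :: y[j] :: (y.take j).reverse).take 5
          = y[j+1] :: y[j] :: ((y.take j).reverse.take 3) from rfl,
        show (y[j] :: (y.take j).reverse.take 4).take 4
          = y[j] :: (((y.take j).reverse.take 4).take 3) from rfl]
    simp [List.take_take]
  cases hr : y.drop (j+7) with
  | nil =>
    have hlen7 : y.length ≤ j + 7 := by
      have := congrArg List.length hr
      simp only [List.length_drop, List.length_nil] at this
      omega
    have hA' : y[j+2] :: ((y.drop (j+3)).take 4) = (y.drop (j+2)).take 6 := by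
      rw [htail5, List.take_eq_take_iff]
      simp only [List.length_drop]
      omega
    have hR' : y.drop (j+8) = [] := by
      rw [List.drop_eq_nil_iff]
      omega
    rw [pvGo.eq_2]
    rw [hbody, hL', hA', hR']
  | cons r rs =>
    have h7 : j + 7 < y.length := by
      have := congrArg List.length hr
      simp only [List.length_drop, List.length_cons] at this
      omega
    have hr' : r :: rs = y[j+7] :: y.drop (j+8) := by
      rw [← hr]
      exact List.drop_eq_getElem_cons h7
    injection hr' with hr1 hr2
    subst hr1 hr2
    have hidx : (y.drop (j+2))[5]? = some y[j+7] := by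
      rw [List.getElem?_drop]
      simp [show j + 2 + 5 = j + 7 from by omega]
    have hA' : (y[j+2] :: (y.drop (j+3)).take 4) ++ [y[j+7]] = (y.drop (j+2)).take 6 := by
      rw [htail5,
          show (y.drop (j+2)).take 6 = (y.drop (j+2)).take 5 ++ ((y.drop (j+2))[5]?).toList
            from List.take_add_one, hidx]
      rfl
    rw [pvGo.eq_4]
    rw [hbody, hL', hA']

-- the loop exits as soon as fewer than two lookahead values remain
lemma pvGo_base (y : List Int) (mp : Int) (j : Nat) (peaks : Int) (h : y.length ≤ j + 2) :
    pvGo mp ((y.take (j+1)).reverse.take 5) ((y.drop (j+1)).take 6) (y.drop (j+7)) peaks = peaks := by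
  have hno : ∀ (cur a1 : Int) (atl : List Int), (y.drop (j+1)).take 6 = cur :: a1 :: atl → False := by
    intro cur a1 atl hEq
    have hlen := congrArg List.length hEq
    simp only [List.length_take, List.length_drop, List.length_cons] at hlen
    omega
  exact pvGo.eq_5 mp _ _ _ peaks hno

-- the streaming loop from position j+1 computes A's remaining fold
lemma pvGo_invariant (y : List Int) (mp : Int) :
    ∀ m j peaks, y.length ≤ j + 1 + m →
      pvGo mp ((y.take (j+1)).reverse.take 5) ((y.drop (j+1)).take 6) (y.drop (j+7)) peaks
        = (PySem.List.pyRange ((j : Int) + 1) ((y.length : Int) - 1) 1).foldl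
            (pvBody y (y.length : Int) mp) peaks := by
  intro m
  induction m with
  | zero =>
    intro j peaks h2
    rw [pvGo_base y mp j peaks (by omega),
        PySem.List.pyRange_one_eq_nil (by omega)]
    rfl
  | succ m ih =>
    intro j peaks h2
    by_cases hc : j + 2 < y.length
    · rw [pvGo_step y mp j peaks hc]
      rw [PySem.List.pyRange_one_cons (by omega)]
      rw [List.foldl_cons]
      have h := ih (j+1) (pvBody y (y.length : Int) mp peaks ((j : Int) + 1)) (by omega)
      have hcast : (((j+1 : Nat) : Int) + 1) = ((j : Int) + 1 + 1) := by push_cast; ring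
      rw [hcast] at h
      exact h
    · rw [pvGo_base y mp j peaks (by omega),
          PySem.List.pyRange_one_eq_nil (by omega)]
      rfl

-- ===== VERDICT (by name: the statement is the Claim_ definition above) =====
theorem count_peaks_py_spec : Claim_equal_count_peaks_py := by
  intro y mp _
  unfold Spec_count_peaks_py
  rw [count_peaks_py_eq_fold]
  cases y with
  | nil =>
    rw [PySem.List.pyRange_one_eq_nil (by norm_num)]
    unfold count_peaks_py_alt
    rw [pvGo.eq_5 mp _ _ _ 0 (by intro _ _ _ h; simp at h)]
    rfl
  | cons y0 t =>
    cases t with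
    | nil =>
      rw [PySem.List.pyRange_one_eq_nil (by norm_num)]
      unfold count_peaks_py_alt
      rw [pvGo.eq_5 mp _ _ _ 0 (by intro _ _ _ h; simp at h)]
      rfl
    | cons y1 t2 =>
      -- first iteration: left5 is empty, no peak is tested, buffers shift to position 1
      have hinv := pvGo_invariant (y0 :: y1 :: t2) mp (y0 :: y1 :: t2).length 0 0 (by omega)
      have hstart : count_peaks_py_alt (y0 :: y1 :: t2) mp
          = pvGo mp (((y0 :: y1 :: t2).take 1).reverse.take 5)
              (((y0 :: y1 :: t2).drop 1).take 6) ((y0 :: y1 :: t2).drop 7) 0 := by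
        unfold count_peaks_py_alt
        rw [show (y0 :: y1 :: t2).take 6 = y0 :: y1 :: t2.take 4 from rfl,
            show (y0 :: y1 :: t2).drop 6 = t2.drop 4 from rfl,
            show (((y0 :: y1 :: t2).take 1).reverse.take 5) = [y0] from rfl,
            show ((y0 :: y1 :: t2).drop 1).take 6 = y1 :: t2.take 5 from rfl,
            show (y0 :: y1 :: t2).drop 7 = t2.drop 5 from rfl]
        cases ht : t2.drop 4 with
        | nil =>
          have hlen : t2.length ≤ 4 := by
            have := congrArg List.length ht
            simp only [List.length_drop, List.length_nil] at this
            omega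
          rw [pvGo.eq_1]
          rw [show t2.take 4 = t2 from List.take_of_length_le hlen,
              show t2.take 5 = t2 from List.take_of_length_le (by omega),
              show t2.drop 5 = [] from List.drop_eq_nil_iff.mpr (by omega)]
          rfl
        | cons r rs =>
          have h4 : 4 < t2.length := by
            have := congrArg List.length ht
            simp only [List.length_drop, List.length_cons] at this
            omega
          have hr' : r :: rs = t2[4] :: t2.drop 5 := by
            rw [← ht]
            exact List.drop_eq_getElem_cons h4
          injection hr' with hr1 hr2
          subst hr1 hr2
          rw [pvGo.eq_3]
          rw [show t2.take 5 = t2.take 4 ++ (t2[4]?).toList from List.take_add_one,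
              List.getElem?_eq_getElem h4]
          rfl
      rw [hstart]
      rw [show (((y0 :: y1 :: t2).take 1).reverse.take 5)
            = ((y0 :: y1 :: t2).take (0+1)).reverse.take 5 from rfl,
          show ((y0 :: y1 :: t2).drop 1).take 6
            = ((y0 :: y1 :: t2).drop (0+1)).take 6 from rfl,
          show (y0 :: y1 :: t2).drop 7 = (y0 :: y1 :: t2).drop (0+7) from rfl] at hinv ⊢
      rw [hinv]
      norm_num
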